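-- pv_equiv track=rewrite | github.com/jgeneson/permutation-vector | fwpv.py | fw
-- ===== SOURCE A (Python) =====
-- from itertools import permutations
--
-- def issubseq(seq, subseq):
--     if len(subseq) == 0:
--         return True
--     else:
--         if len(seq) == 0:
--             return False
--         elif seq[-1] == subseq[-1]:
--             return issubseq(seq[:-1],subseq[:-1])
--         elif seq[-1] != subseq[-1]:
--             return issubseq(seq[:-1],subseq)
--
-- def fw(u):
--     l=len(set(u))
--     v = list(u)
--     rsformset = set()
--     rsformset1 = set()
--     q = tuple(range(l))
--     q1 = q[::-1]
--     rsformset.add(q)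
--     rsform1=q
--     while len(rsformset)!=0:
--         for rsforms in rsformset:
--             done=False
--             for perms in permutations(range(l)):
--                 for i in range(len(u)):
--                     v[i] = perms[u[i]]
--                 if issubseq(rsforms, v):
--                     done=True
--                     break
--             if not done:
--                 rsformset1.add(rsforms+q)
--                 rsformset1.add(rsforms+q1)
--                 rsform1=rsforms+q
--         rsformset.clear()
--         for rsform in rsformset1:
--             rsformset.add(rsform)
--         rsformset1.clear()
--     return len(rsform1)//l
-- ===== SOURCE B (Python) =====
-- from itertools import permutations, product
--
-- def fw(u):
--     l = len(set(u))
--     # all distinct relabelings of u, built once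
--     V = {tuple(p[x] for x in u) for p in permutations(range(l))}
--
--     def covered(bits):
--         # is some relabeling of u embeddable in the block word encoded by bits
--         # (bit 0 = increasing block, bit 1 = decreasing block)?  Greedy matching
--         # by positions within blocks; the blocks are never materialized.
--         for v in V:
--             rem = list(v)
--             for bit in bits:
--                 pos = -1
--                 while rem:
--                     i = rem[0] if bit == 0 else l - 1 - rem[0]
--                     if i <= pos:
--                         break
--                     pos = i
--                     rem.pop(0)
--                 if not rem:
--                     break
--             if not rem:
--                 return True
--         return False
--
--     # smallest k such that every k-block word starting with an increasing block
--     # contains some relabeling of u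
--     k = 1
--     while not all(covered((0,) + bits) for bits in product((0, 1), repeat=k - 1)):
--         k += 1
--     return k
-- ===== Notes on version B (the rewrite author's own statement) =====
-- stated objective: alternative
-- what changed: B drops A's frontier BFS (rsformset/rsformset1 of materialized concatenations, per-form re-enumeration of all permutations, recursive slicing issubseq, answer recovered as len(rsform1)//l) and instead precomputes the distinct relabelings once, then for k = 1,2,... enumerates every k-block word directly as a bit tuple via itertools.product and tests coverage with a greedy position-within-block matcher that never materializes a word, returning the level counter k.
-- outside the precondition, e.g. on fw(()): A raises ZeroDivisionError, B returns 1; on fw((0, 2)): A raises IndexError, B raises IndexError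
import Mathlib
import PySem

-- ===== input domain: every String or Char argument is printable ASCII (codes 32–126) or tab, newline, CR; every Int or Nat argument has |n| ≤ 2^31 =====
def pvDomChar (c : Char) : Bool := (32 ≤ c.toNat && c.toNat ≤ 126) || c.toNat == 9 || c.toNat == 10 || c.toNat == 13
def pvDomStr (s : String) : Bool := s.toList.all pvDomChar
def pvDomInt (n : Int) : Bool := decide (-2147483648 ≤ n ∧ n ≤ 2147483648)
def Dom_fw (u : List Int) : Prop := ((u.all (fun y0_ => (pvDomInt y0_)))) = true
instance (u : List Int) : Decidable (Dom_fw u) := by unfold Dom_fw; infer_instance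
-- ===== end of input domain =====

-- B replaces A's frontier BFS over materialized concatenations tested by the recursive issubseq
-- with a per-level enumeration of all block words as bit tuples, tested by a greedy
-- position-within-block matcher that never materializes a word; the level counter is the answer.

-- ===== PORT A =====
-- issubseq: recursion from the back, seq[:-1] = dropLast, seq[-1] via pyGet? (-1)
def issubseqA (seq subseq : List Int) : Bool :=
  if subseq.length = 0 then true
  else if _h : seq.length = 0 then false
  else if PySem.List.pyGet? seq (-1) = PySem.List.pyGet? subseq (-1) then
    issubseqA seq.dropLast subseq.dropLast
  else
    issubseqA seq.dropLast subseq
termination_by seq.length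
decreasing_by all_goals (simp [List.length_dropLast]; omega)

-- one pass of "for rsforms in rsformset: …", folding (rsformset1, rsform1)
def fwRoundA (done : List Int → Bool) (q q1 : List Int)
    (S : List (List Int)) (r : List Int) : PySem.Set (List Int) × List Int :=
  S.foldl (fun acc s =>
      if done s then acc
      else (PySem.Set.add (PySem.Set.add acc.1 (s ++ q)) (s ++ q1), s ++ q))
    (PySem.Set.empty, r)

-- the while loop (fuel bounds the number of rounds; the Python loop always ends within it)
def fwLoopA (done : List Int → Bool) (q q1 : List Int) :
    Nat → PySem.Set (List Int) → List Int → List Int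
  | 0, _, r => r
  | fuel + 1, S, r =>
    if S.length = 0 then r
    else
      let p := fwRoundA done q q1 S r
      -- rsformset.clear(); for rsform in rsformset1: rsformset.add(rsform)
      let S' := p.1.foldl PySem.Set.add PySem.Set.empty
      fwLoopA done q q1 fuel S' p.2

def fw (u : List Int) : Int :=
  let l := (PySem.Set.ofList u).length
  let q : List Int := (List.range l).map Int.ofNat
  let q1 := q.reverse
  -- done = any perm in permutations(range(l)) with v = [perms[u[i]] for i] a subsequence
  let done : List Int → Bool := fun s =>
    (PySem.List.permutations q q.length).any (fun p =>
      issubseqA s (u.map (fun x => (PySem.List.pyGet? p x).getD 0)))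
  let r := fwLoopA done q q1 (u.length + 2) (PySem.Set.add PySem.Set.empty q) q
  PySem.Int.floordiv (r.length : Int) (l : Int)

-- ===== PORT B =====
-- the inner 'while rem' loop: pos-based greedy consumption of rem within one block
-- (bit = false: increasing block, index of x is x; bit = true: decreasing, index l-1-x)
def posConsume (l : Int) (bit : Bool) : Int → List Int → List Int
  | _, [] => []
  | pos, x :: rem =>
    if (if bit = false then x else l - 1 - x) ≤ pos then x :: rem
    else posConsume l bit (if bit = false then x else l - 1 - x) rem

-- covered(bits): some relabeling v in V is greedily embeddable along the bit word
def coveredB (l : Int) (V : List (List Int)) (bits : List Bool) : Bool :=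
  V.any (fun v => (bits.foldl (fun rem bit => posConsume l bit (-1) rem) v).isEmpty)

-- itertools.product((0,1), repeat=n)
def allBits : Nat → List (List Bool)
  | 0 => [[]]
  | n + 1 => (allBits n).flatMap (fun bs => [bs ++ [false], bs ++ [true]])

-- 'k = 1; while not all(covered((0,)+bits) …): k += 1; return k' (fuel makes it total)
def fwLoopB (cov : List Bool → Bool) : Nat → Nat → Nat
  | 0, k => k
  | fuel + 1, k =>
    if (allBits (k - 1)).all (fun bs => cov (false :: bs)) then k
    else fwLoopB cov fuel (k + 1)

def fw_alt (u : List Int) : Int :=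
  let l := (PySem.Set.ofList u).length
  let q : List Int := (List.range l).map Int.ofNat
  let V : PySem.Set (List Int) := PySem.Set.ofList
    ((PySem.List.permutations q q.length).map
      (fun p => u.map (fun x => (PySem.List.pyGet? p x).getD 0)))
  Int.ofNat (fwLoopB (coveredB (l : Int) V) (u.length + 2) 1)

-- ===== PRECONDITION & SPEC =====
-- Pre_ excludes exactly the inputs on which A raises: the empty list (ZeroDivisionError in
-- len(rsform1)//l with l = 0) and lists containing an element outside [-l, l) with
-- l = len(set(u)) (IndexError in perms[u[i]]).
def Pre_fw (u : List Int) : Prop :=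
  u ≠ [] ∧ ∀ x ∈ u,
    -((PySem.Set.ofList u).length : Int) ≤ x ∧ x < ((PySem.Set.ofList u).length : Int)
instance (u : List Int) : Decidable (Pre_fw u) := by unfold Pre_fw; infer_instance

def pvWitness_fw : List Int := [0, 1, 0]

def Spec_fw (u : List Int) (out : Int) : Prop := out = fw_alt u
instance (u : List Int) (out : Int) : Decidable (Spec_fw u out) := by unfold Spec_fw; infer_instance

-- ===== CLAIM (what is proved, stated in full; the proofs are below) =====
def Claim_equal_fw : Prop := ∀ (u : List Int), Dom_fw u → Pre_fw u → Spec_fw u (fw u)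

-- ===== LEMMAS AND PROOFS =====

-- proof-side abbreviations for the pieces both ports are built from
def qOf (l : Nat) : List Int := (List.range l).map Int.ofNat
def relab (u p : List Int) : List Int := u.map (fun x => (PySem.List.pyGet? p x).getD 0)
def doneA (u : List Int) (l : Nat) (s : List Int) : Bool :=
  (PySem.List.permutations (qOf l) (qOf l).length).any (fun p => issubseqA s (relab u p))
def VOf (u : List Int) (l : Nat) : PySem.Set (List Int) :=
  PySem.Set.ofList ((PySem.List.permutations (qOf l) (qOf l).length).map (relab u))
-- the flattened block word a bit list encodes
def wordOf (l : Nat) (bits : List Bool) : List Int :=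
  (bits.map (fun b => if b then (qOf l).reverse else qOf l)).flatten
-- all level-k words (first block increasing, as in A's root q)
def Wk (l : Nat) (k : Nat) : List (List Int) :=
  (allBits (k - 1)).map (fun bs => wordOf l (false :: bs))

-- two-pointer residual: what remains of v after greedily matching it into w
def tp : List Int → List Int → List Int
  | [], v => v
  | _ :: _, [] => []
  | a :: w, x :: v => if a = x then tp w v else tp w (x :: v)

lemma tp_nil_right (w : List Int) : tp w [] = [] := by cases w <;> rfl

lemma tp_append (w1 w2 v : List Int) : tp (w1 ++ w2) v = tp w2 (tp w1 v) := by
  induction w1 generalizing v with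
  | nil => rfl
  | cons a w1 ih =>
    cases v with
    | nil => simp [tp, tp_nil_right]
    | cons x v => by_cases h : a = x <;> simp [tp, h, ih]

lemma tp_not_mem (w : List Int) (x : Int) (v : List Int) (h : x ∉ w) :
    tp w (x :: v) = x :: v := by
  induction w with
  | nil => rfl
  | cons a w ih =>
    have hax : a ≠ x := fun he => h (by simp [he])
    simp only [tp, if_neg hax]
    exact ih (fun hm => h (by simp [hm]))

lemma tp_nil_iff (w v : List Int) : tp w v = [] ↔ v.Sublist w := by
  induction w generalizing v with
  | nil =>
    cases v with
    | nil => simp [tp]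
    | cons x v => simp [tp]
  | cons a w ih =>
    cases v with
    | nil => simp [tp]
    | cons x v =>
      by_cases h : a = x
      · subst h
        rw [show tp (a :: w) (a :: v) = tp w v from by simp [tp], ih, List.cons_sublist_cons]
      · rw [show tp (a :: w) (x :: v) = tp w (x :: v) from by simp [tp, h], ih]
        constructor
        · intro hs; exact hs.cons a
        · intro hs; exact List.Sublist.of_cons_of_ne (fun he => h he.symm) hs

lemma rev_decomp (s : List Int) (h : s ≠ []) :
    s.reverse = s.getLast h :: s.dropLast.reverse := by
  conv_lhs => rw [← List.dropLast_append_getLast h]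
  simp

lemma issubseqA_iff (s t : List Int) : issubseqA s t = true ↔ t.Sublist s := by
  fun_induction issubseqA s t with
  | case1 s t ht =>
    rw [List.length_eq_zero_iff] at ht; subst ht; simp
  | case2 s t ht hs =>
    rw [List.length_eq_zero_iff] at hs; subst hs
    simp only [List.sublist_nil]
    constructor
    · intro h; cases h
    · intro h; subst h; simp at ht
  | case3 s t ht hs hcond ih =>
    have hs' : s ≠ [] := by intro he; subst he; simp at hs
    have ht' : t ≠ [] := by intro he; subst he; simp at ht
    rw [PySem.List.pyGet?_neg_one, PySem.List.pyGet?_neg_one,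
      List.getLast?_eq_some_getLast hs', List.getLast?_eq_some_getLast ht'] at hcond
    have heq : s.getLast hs' = t.getLast ht' := by simpa using hcond
    rw [ih, ← List.reverse_sublist, ← List.reverse_sublist (l₁ := t),
      rev_decomp s hs', rev_decomp t ht', heq, List.cons_sublist_cons]
  | case4 s t ht hs hcond ih =>
    have hs' : s ≠ [] := by intro he; subst he; simp at hs
    have ht' : t ≠ [] := by intro he; subst he; simp at ht
    rw [PySem.List.pyGet?_neg_one, PySem.List.pyGet?_neg_one,
      List.getLast?_eq_some_getLast hs', List.getLast?_eq_some_getLast ht'] at hcond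
    have hne : s.getLast hs' ≠ t.getLast ht' := by simpa using hcond
    rw [ih, ← List.reverse_sublist, ← List.reverse_sublist (l₁ := t),
      rev_decomp s hs', rev_decomp t ht']
    constructor
    · intro h; exact h.cons _
    · intro h
      exact List.Sublist.of_cons_of_ne (fun he => hne he.symm) h

lemma posConsume_cons_false (l pos x : Int) (v : List Int) :
    posConsume l false pos (x :: v) = if x ≤ pos then x :: v else posConsume l false x v := by
  simp [posConsume]

lemma posConsume_cons_true (l pos x : Int) (v : List Int) :
    posConsume l true pos (x :: v)
      = if l - 1 - x ≤ pos then x :: v else posConsume l true (l - 1 - x) v := by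
  simp [posConsume]

lemma posConsume_mem (l : Int) (b : Bool) :
    ∀ (pos : Int) (v : List Int) (y : Int), y ∈ posConsume l b pos v → y ∈ v := by
  intro pos v
  induction v generalizing pos with
  | nil => intro y h; simpa [posConsume] using h
  | cons x v ih =>
    intro y h
    simp only [posConsume] at h
    by_cases hc : (if b = false then x else l - 1 - x) ≤ pos
    · rw [if_pos hc] at h; exact h
    · rw [if_neg hc] at h; exact List.mem_cons_of_mem x (ih _ y h)

-- greedy on an increasing block: tp over the block suffix [s, …, l-1] = pos-based loop
lemma range'_split (s l x : Nat) (h1 : s ≤ x) (h2 : x < l) :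
    List.range' s (l - s) = (List.range' s (x - s) ++ [x]) ++ List.range' (x+1) (l-(x+1)) := by
  have e1 : (x - s) + (1 + (l - (x + 1))) = l - s := by omega
  have e2 : s + (x - s) = x := by omega
  have e3 : 1 + (l - (x + 1)) = (l - (x + 1)) + 1 := by omega
  calc List.range' s (l - s) = List.range' s ((x - s) + (1 + (l - (x + 1)))) := by rw [e1]
    _ = List.range' s (x - s) ++ List.range' (s + (x - s)) (1 + (l - (x + 1))) :=
        List.range'_append_1.symm
    _ = (List.range' s (x - s) ++ [x]) ++ List.range' (x+1) (l-(x+1)) := by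
        rw [e2, e3, List.range'_succ]
        simp

lemma tp_inc (l : Nat) (v : List Int) (hv : ∀ x ∈ v, 0 ≤ x ∧ x < (l : Int)) :
    ∀ s : Nat, s ≤ l →
      tp ((List.range' s (l - s)).map Int.ofNat) v = posConsume (l : Int) false ((s : Int) - 1) v := by
  induction v with
  | nil => intro s _; simp [tp_nil_right, posConsume]
  | cons x v ih =>
    intro s hs
    obtain ⟨hx0, hxl⟩ := hv x (by simp)
    have hvv : ∀ y ∈ v, 0 ≤ y ∧ y < (l : Int) := fun y hy => hv y (by simp [hy])
    by_cases hxs : x < (s : Int)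
    · rw [tp_not_mem]
      · rw [posConsume_cons_false, if_pos (by omega : x ≤ (s : Int) - 1)]
      · intro hm
        rcases List.mem_map.mp hm with ⟨m, hm', he⟩
        rw [List.mem_range'_1] at hm'
        simp only [Int.ofNat_eq_natCast] at he
        omega
    · -- s ≤ x < l : the block suffix splits as [s..x-1] ++ [x] ++ [x+1..l-1]
      have hxn : x = (x.toNat : Int) := by omega
      rw [range'_split s l x.toNat (by omega) (by omega), List.map_append, List.map_append,
        tp_append, tp_append]
      rw [tp_not_mem _ x v (by
        intro hm
        rcases List.mem_map.mp hm with ⟨m, hm', he⟩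
        rw [List.mem_range'_1] at hm'
        simp only [Int.ofNat_eq_natCast] at he
        omega)]
      rw [show ([x.toNat].map Int.ofNat) = [x] from by simp [← hxn],
        show tp [x] (x :: v) = v from by simp [tp]]
      rw [ih hvv (x.toNat + 1) (by omega)]
      rw [posConsume_cons_false, if_neg (by omega : ¬ x ≤ (s : Int) - 1)]
      congr 1
      omega

-- greedy on a decreasing block: tp over [m-1, …, 0] = pos-based loop with index l-1-x
lemma tp_dec (l : Nat) (v : List Int) (hv : ∀ x ∈ v, 0 ≤ x ∧ x < (l : Int)) :
    ∀ m : Nat, m ≤ l →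
      tp (((List.range m).map Int.ofNat).reverse) v = posConsume (l : Int) true ((l : Int) - 1 - m) v := by
  induction v with
  | nil => intro m _; simp [tp_nil_right, posConsume]
  | cons x v ih =>
    intro m hm
    obtain ⟨hx0, hxl⟩ := hv x (by simp)
    have hvv : ∀ y ∈ v, 0 ≤ y ∧ y < (l : Int) := fun y hy => hv y (by simp [hy])
    by_cases hxm : (m : Int) ≤ x
    · rw [tp_not_mem]
      · rw [posConsume_cons_true, if_pos (by omega : (l : Int) - 1 - x ≤ (l : Int) - 1 - m)]
      · intro hmem
        rcases List.mem_map.mp (List.mem_reverse.mp hmem) with ⟨j, hj, he⟩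
        rw [List.mem_range] at hj
        simp only [Int.ofNat_eq_natCast] at he
        omega
    · -- x < m : the reversed block splits as [m-1..x+1] ++ [x] ++ [x-1..0]
      have hxn : x = (x.toNat : Int) := by omega
      have hsplit : List.range m = (List.range x.toNat ++ [x.toNat])
          ++ List.range' (x.toNat + 1) (m - (x.toNat + 1)) := by
        rw [List.range_eq_range', List.range_eq_range']
        rw [show List.range' 0 m = List.range' 0 (m - 0) from by rw [Nat.sub_zero],
          show List.range' 0 x.toNat = List.range' 0 (x.toNat - 0) from by rw [Nat.sub_zero]]
        exact range'_split 0 m x.toNat (by omega) (by omega)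
      rw [hsplit, List.map_append, List.map_append, List.reverse_append, List.reverse_append,
        tp_append, tp_append]
      rw [tp_not_mem _ x v (by
        intro hmem
        rcases List.mem_map.mp (List.mem_reverse.mp hmem) with ⟨j, hj, he⟩
        rw [List.mem_range'_1] at hj
        simp only [Int.ofNat_eq_natCast] at he
        omega)]
      rw [show (([x.toNat].map Int.ofNat).reverse) = [x] from by simp [← hxn],
        show tp [x] (x :: v) = v from by simp [tp]]
      rw [ih hvv x.toNat (by omega)]
      rw [posConsume_cons_true, if_neg (by omega : ¬ ((l : Int) - 1 - x ≤ (l : Int) - 1 - m))]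
      congr 1
      omega

-- the per-block fold of B's greedy equals the two-pointer residual over the flattened word
lemma fold_posConsume_eq_tp (l : Nat) (bits : List Bool) :
    ∀ v : List Int, (∀ x ∈ v, 0 ≤ x ∧ x < (l : Int)) →
      bits.foldl (fun rem bit => posConsume (l : Int) bit (-1) rem) v = tp (wordOf l bits) v := by
  induction bits with
  | nil => intro v _; simp [wordOf, tp]
  | cons b bits ih =>
    intro v hv
    have hblk : tp (if b then (qOf l).reverse else qOf l) v = posConsume (l : Int) b (-1) v := by
      cases b with
      | false =>
        have := tp_inc l v hv 0 (by omega)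
        simpa [qOf, List.range_eq_range'] using this
      | true =>
        have := tp_dec l v hv l (le_refl l)
        simpa [qOf] using this
    have hword : wordOf l (b :: bits) = (if b then (qOf l).reverse else qOf l) ++ wordOf l bits := by
      simp [wordOf]
    rw [hword, tp_append, hblk]
    simp only [List.foldl_cons]
    exact ih _ (fun x hx => hv x (posConsume_mem _ _ _ _ _ hx))

lemma any_ofList {α : Type} [BEq α] [LawfulBEq α] (xs : List α) (p : α → Bool) :
    (PySem.Set.ofList xs).any p = xs.any p := by
  rw [Bool.eq_iff_iff]
  simp only [List.any_eq_true]
  constructor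
  · rintro ⟨v, hv, hp⟩; exact ⟨v, (PySem.Set.mem_ofList xs v).mp hv, hp⟩
  · rintro ⟨v, hv, hp⟩; exact ⟨v, (PySem.Set.mem_ofList xs v).mpr hv, hp⟩

-- every relabeling has values in [0, l) (for l > 0)
lemma relab_range (u : List Int) (l : Nat) (hl : 0 < l)
    (p : List Int) (hp : p ∈ PySem.List.permutations (qOf l) (qOf l).length) :
    ∀ x ∈ relab u p, 0 ≤ x ∧ x < (l : Int) := by
  intro x hx
  rcases List.mem_map.mp hx with ⟨y, _, he⟩
  have hq : ∀ z ∈ qOf l, 0 ≤ z ∧ z < (l : Int) := by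
    intro z hz
    rcases List.mem_map.mp hz with ⟨j, hj, he'⟩
    rw [List.mem_range] at hj
    simp only [Int.ofNat_eq_natCast] at he'
    omega
  cases hg : PySem.List.pyGet? p y with
  | none => rw [← he, hg]; simpa using hl
  | some z =>
    have hz : z ∈ p := PySem.List.mem_of_pyGet?_eq_some p hg
    have := hq z ((PySem.List.perm_of_mem_permutations hp).mem_iff.mp hz)
    rw [← he, hg]
    simpa using this

-- the bridge: B's covered on a bit word = A's done on the flattened word
lemma covered_eq_doneA (u : List Int) (l : Nat) (hl : 0 < l) (bits : List Bool) :
    coveredB (l : Int) (VOf u l) bits = doneA u l (wordOf l bits) := by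
  unfold coveredB VOf doneA
  rw [any_ofList, List.any_map]
  refine PySem.List.any_congr_mem (fun p hp => ?_)
  rw [Function.comp_apply, fold_posConsume_eq_tp l bits (relab u p) (relab_range u l hl p hp)]
  rw [Bool.eq_iff_iff, List.isEmpty_iff, tp_nil_iff, issubseqA_iff]

lemma doneA_mono (u : List Int) (l : Nat) (w t : List Int)
    (h : doneA u l w = true) : doneA u l (w ++ t) = true := by
  unfold doneA at h ⊢
  rw [List.any_eq_true] at h ⊢
  rcases h with ⟨p, hp, hs⟩
  exact ⟨p, hp, by
    rw [issubseqA_iff] at hs ⊢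
    exact hs.trans (List.sublist_append_left w t)⟩

lemma mem_allBits (n : Nat) (bs : List Bool) : bs ∈ allBits n ↔ bs.length = n := by
  induction n generalizing bs with
  | zero => simp [allBits, List.length_eq_zero_iff]
  | succ n ih =>
    simp only [allBits, List.mem_flatMap]
    constructor
    · rintro ⟨cs, hcs, hmem⟩
      rw [ih] at hcs
      rcases List.mem_cons.mp hmem with he | he
      · subst he; simp [hcs]
      · rw [List.mem_singleton] at he; subst he; simp [hcs]
    · intro hlen
      have hne : bs ≠ [] := by intro he; subst he; simp at hlen
      refine ⟨bs.dropLast, ?_, ?_⟩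
      · rw [ih]
        simp [List.length_dropLast, hlen]
      · have hd : bs = bs.dropLast ++ [bs.getLast hne] := (List.dropLast_append_getLast hne).symm
        cases hb : bs.getLast hne
        · exact List.mem_cons.mpr (Or.inl (by rw [← hb]; exact hd))
        · exact List.mem_cons.mpr (Or.inr (List.mem_singleton.mpr (by rw [← hb]; exact hd)))

lemma wordOf_length (l : Nat) (bits : List Bool) : (wordOf l bits).length = bits.length * l := by
  induction bits with
  | nil => simp [wordOf]
  | cons b bits ih =>
    have hw : wordOf l (b :: bits) = (if b then (qOf l).reverse else qOf l) ++ wordOf l bits := by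
      simp [wordOf]
    rw [hw, List.length_append, ih]
    cases b <;> simp [qOf] <;> ring

-- reused pieces about A's round
lemma fwRoundA_split (done : List Int → Bool) (q q1 : List Int) :
    ∀ (S : List (List Int)) (T : PySem.Set (List Int)) (r : List Int),
      S.foldl (fun acc s =>
          if done s then acc
          else (PySem.Set.add (PySem.Set.add acc.1 (s ++ q)) (s ++ q1), s ++ q)) (T, r)
      = (PySem.Set.update T (S.flatMap (fun w => if done w then [] else [w ++ q, w ++ q1])),
         S.foldl (fun cur s => if done s then cur else s ++ q) r) := by
  intro S
  induction S with
  | nil => intro T r; simp [PySem.Set.update_nil]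
  | cons s S ih =>
    intro T r
    simp only [List.foldl_cons, List.flatMap_cons]
    by_cases hd : done s
    · simp [hd, ih]
    · simp only [hd, Bool.false_eq_true, ite_false]
      rw [ih]
      rw [PySem.Set.update_append, PySem.Set.update_cons, PySem.Set.update_cons,
        PySem.Set.update_nil]

lemma flatMap_eq_nil_iff (done : List Int → Bool) (q q1 : List Int) (S : List (List Int)) :
    S.flatMap (fun w => if done w then [] else [w ++ q, w ++ q1]) = []
      ↔ ∀ s ∈ S, done s = true := by
  induction S with
  | nil => simp
  | cons s S ih =>
    simp only [List.flatMap_cons, List.append_eq_nil_iff, ih, List.mem_cons]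
    constructor
    · rintro ⟨h1, h2⟩ x hx
      rcases hx with rfl | hx
      · by_contra hc; simp [hc] at h1
      · exact h2 x hx
    · intro h
      refine ⟨by simp [h s (Or.inl rfl)], fun x hx => h x (Or.inr hx)⟩

lemma lastfail_all_done (done : List Int → Bool) (q : List Int) :
    ∀ (S : List (List Int)) (r : List Int), (∀ s ∈ S, done s = true) →
    S.foldl (fun cur s => if done s then cur else s ++ q) r = r := by
  intro S
  induction S with
  | nil => intro r _; rfl
  | cons s S ih =>
    intro r h
    simp only [List.foldl_cons, h s (by simp)]
    exact ih r (fun x hx => h x (by simp [hx]))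

lemma lastfail_len (done : List Int → Bool) (q : List Int) (k : Nat) :
    ∀ (S : List (List Int)) (r : List Int), (∀ s ∈ S, s.length = k) →
      (∃ s ∈ S, done s = false) →
      (S.foldl (fun cur s => if done s then cur else s ++ q) r).length = k + q.length := by
  intro S
  induction S with
  | nil => rintro r _ ⟨s, hs, _⟩; simp at hs
  | cons s S ih =>
    intro r hlen hex
    simp only [List.foldl_cons]
    by_cases hall : ∀ x ∈ S, done x = true
    · rcases hex with ⟨w, hw, hwf⟩
      rcases List.mem_cons.mp hw with rfl | hwS
      · rw [hwf, if_neg (by simp)]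
        rw [lastfail_all_done done q S _ hall]
        simp [hlen w (by simp)]
      · rw [hall w hwS] at hwf; simp at hwf
    · push Not at hall
      rcases hall with ⟨w, hwS, hwf⟩
      exact ih _ (fun x hx => hlen x (by simp [hx]))
        ⟨w, hwS, by simpa using hwf⟩

lemma ofList_cast (G : List (List Int)) :
    (PySem.Set.ofList G).foldl PySem.Set.add PySem.Set.empty = PySem.Set.ofList G := by
  rw [show (PySem.Set.empty : PySem.Set (List Int)) = [] from rfl,
    ← PySem.Set.ofList_eq_foldl, PySem.Set.ofList_ofList]

lemma fwLoopA_nil (done : List Int → Bool) (q q1 : List Int) (fuel : Nat) (r : List Int) :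
    fwLoopA done q q1 fuel [] r = r := by
  cases fuel <;> simp [fwLoopA]

-- the lockstep equivalence of the two loops
lemma loop_eq (u : List Int) (l : Nat) (hl : 0 < l) :
    ∀ (fuel : Nat) (F : PySem.Set (List Int)) (r : List Int) (k : Nat), 1 ≤ k →
      (∀ w ∈ F, w ∈ Wk l k) →
      (∀ w ∈ Wk l k, doneA u l w = false → w ∈ F) →
      r.length = k * l →
      (fwLoopA (doneA u l) (qOf l) ((qOf l).reverse) fuel F r).length
        = (fwLoopB (coveredB (l : Int) (VOf u l)) fuel k) * l := by
  intro fuel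
  induction fuel with
  | zero => intro F r k _ _ _ hr; simpa [fwLoopA, fwLoopB] using hr
  | succ fuel ih =>
    intro F r k hk hFW hWF hr
    have hcond : ((allBits (k - 1)).all (fun bs => coveredB (l : Int) (VOf u l) (false :: bs)))
        = ((allBits (k - 1)).all (fun bs => doneA u l (wordOf l (false :: bs)))) := by
      rw [Bool.eq_iff_iff, List.all_eq_true, List.all_eq_true]
      constructor
      · intro h bs hbs; rw [← covered_eq_doneA u l hl (false :: bs)]; exact h bs hbs
      · intro h bs hbs; rw [covered_eq_doneA u l hl (false :: bs)]; exact h bs hbs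
    simp only [fwLoopA, fwLoopB, hcond]
    by_cases hall : ∀ w ∈ Wk l k, doneA u l w = true
    · have hallb : ((allBits (k - 1)).all (fun bs => doneA u l (wordOf l (false :: bs)))) = true := by
        rw [List.all_eq_true]
        intro bs hbs
        exact hall _ (List.mem_map.mpr ⟨bs, hbs, rfl⟩)
      rw [if_pos hallb]
      by_cases hFn : F.length = 0
      · simpa [hFn] using hr
      · rw [if_neg hFn]
        have hFd : ∀ s ∈ F, doneA u l s = true := fun s hs => hall s (hFW s hs)
        simp only [fwRoundA, fwRoundA_split]
        rw [(flatMap_eq_nil_iff (doneA u l) (qOf l) ((qOf l).reverse) F).mpr hFd]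
        rw [lastfail_all_done _ _ _ _ hFd]
        rw [show PySem.Set.update (PySem.Set.empty) ([] : List (List Int)) = PySem.Set.ofList [] from
          PySem.Set.update_empty []]
        rw [show (PySem.Set.ofList ([] : List (List Int))) = [] from rfl]
        rw [show ([] : List (List Int)).foldl PySem.Set.add PySem.Set.empty = [] from rfl]
        rw [fwLoopA_nil]
        exact hr
    · push Not at hall
      rcases hall with ⟨w0, hw0W, hw0f⟩
      have hw0f' : doneA u l w0 = false := by simpa using hw0f
      have hw0F : w0 ∈ F := hWF w0 hw0W hw0f'
      have hallb : ((allBits (k - 1)).all (fun bs => doneA u l (wordOf l (false :: bs)))) = false := by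
        rw [List.all_eq_false]
        rcases List.mem_map.mp hw0W with ⟨bs0, hbs0, he0⟩
        exact ⟨bs0, hbs0, by rw [he0, hw0f']; simp⟩
      have hFn : ¬ (List.length F = 0) := by
        intro hc
        rw [List.length_eq_zero_iff] at hc
        rw [hc] at hw0F
        simp at hw0F
      rw [if_neg hFn,
        if_neg (show ¬ (((allBits (k - 1)).all fun bs => doneA u l (wordOf l (false :: bs))) = true)
          from by simp [hallb])]
      simp only [fwRoundA, fwRoundA_split]
      set G := F.flatMap (fun w => if doneA u l w then [] else [w ++ qOf l, w ++ (qOf l).reverse])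
        with hG
      rw [PySem.Set.update_empty G, ofList_cast]
      -- lengths of the frontier elements
      have hWlen : ∀ w ∈ Wk l k, w.length = k * l := by
        intro w hw
        rcases List.mem_map.mp hw with ⟨bs, hbs, he⟩
        rw [mem_allBits] at hbs
        rw [← he, wordOf_length]
        simp [hbs]
        omega
      -- invariant at level k+1
      have hstep1 : ∀ w ∈ PySem.Set.ofList G, w ∈ Wk l (k + 1) := by
        intro w hw
        rcases List.mem_flatMap.mp ((PySem.Set.mem_ofList G w).mp hw) with ⟨s, hsF, hws⟩
        by_cases hd : doneA u l s
        · simp [hd] at hws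
        · simp only [hd, Bool.false_eq_true, ite_false, List.mem_cons, List.not_mem_nil,
            or_false] at hws
          rcases List.mem_map.mp (hFW s hsF) with ⟨bs, hbs, he⟩
          rw [mem_allBits] at hbs
          have hcons : ∀ b : Bool, wordOf l (false :: bs) ++ (if b then (qOf l).reverse else qOf l)
              = wordOf l (false :: (bs ++ [b])) := by
            intro b
            simp [wordOf, List.map_append]
          refine List.mem_map.mpr ?_
          rcases hws with rfl | rfl
          · exact ⟨bs ++ [false], (mem_allBits _ _).mpr (by simp [hbs]; omega),
              by rw [← hcons false, he]; simp⟩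
          · exact ⟨bs ++ [true], (mem_allBits _ _).mpr (by simp [hbs]; omega),
              by rw [← hcons true, he]; simp⟩
      have hstep2 : ∀ w ∈ Wk l (k + 1), doneA u l w = false → w ∈ PySem.Set.ofList G := by
        intro w hw hwf
        rcases List.mem_map.mp hw with ⟨bs', hbs', he⟩
        rw [mem_allBits] at hbs'
        have hbs'len : bs'.length = k := by omega
        have hne : bs' ≠ [] := by intro hc; rw [hc] at hbs'len; simp at hbs'len; omega
        set b := bs'.getLast hne with hb
        set cs := bs'.dropLast with hcs
        have hdec : bs' = cs ++ [b] := (List.dropLast_append_getLast hne).symm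
        have hsplit : w = wordOf l (false :: cs) ++ (if b then (qOf l).reverse else qOf l) := by
          rw [← he, hdec]
          simp [wordOf, List.map_append]
        have hsf : doneA u l (wordOf l (false :: cs)) = false := by
          by_contra hc
          rw [Bool.not_eq_false] at hc
          have := doneA_mono u l _ (if b then (qOf l).reverse else qOf l) hc
          rw [← hsplit] at this
          rw [this] at hwf
          simp at hwf
        have hsW : wordOf l (false :: cs) ∈ Wk l k := by
          refine List.mem_map.mpr ⟨cs, (mem_allBits _ _).mpr ?_, rfl⟩
          rw [hcs]
          simp [List.length_dropLast, hbs'len]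
        have hsF : wordOf l (false :: cs) ∈ F := hWF _ hsW hsf
        refine (PySem.Set.mem_ofList G w).mpr ?_
        refine List.mem_flatMap.mpr ⟨wordOf l (false :: cs), hsF, ?_⟩
        rw [hsf]
        simp only [Bool.false_eq_true, ite_false]
        cases hbv : b
        · rw [hsplit, hbv]; simp
        · rw [hsplit, hbv]; simp
      have hr' : ((F : List (List Int)).foldl
          (fun cur s => if doneA u l s then cur else s ++ qOf l) r).length = (k + 1) * l := by
        rw [lastfail_len (doneA u l) (qOf l) (k * l) F r
          (fun s hs => hWlen s (hFW s hs)) ⟨w0, hw0F, hw0f'⟩]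
        simp [qOf]
        ring
      exact ih (PySem.Set.ofList G) _ (k + 1) (by omega) hstep1 hstep2 hr'

theorem fw_eq (u : List Int) (hu : Pre_fw u) : fw u = fw_alt u := by
  obtain ⟨hne, -⟩ := hu
  have hl : 0 < (PySem.Set.ofList u).length := by
    rcases List.exists_mem_of_ne_nil u hne with ⟨x, hx⟩
    exact List.length_pos_of_mem ((PySem.Set.mem_ofList u x).mpr hx)
  set l := (PySem.Set.ofList u).length with hldef
  have hA : fw u = PySem.Int.floordiv
      (((fwLoopA (doneA u l) (qOf l) ((qOf l).reverse) (u.length + 2)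
        (PySem.Set.add PySem.Set.empty (qOf l)) (qOf l)).length : Int))
      ((l : Nat) : Int) := rfl
  have hB : fw_alt u = Int.ofNat (fwLoopB (coveredB ((l : Nat) : Int) (VOf u l)) (u.length + 2) 1) := rfl
  rw [hA, hB]
  have hinit : (PySem.Set.add PySem.Set.empty (qOf l) : PySem.Set (List Int)) = [qOf l] := rfl
  have hW1 : Wk l 1 = [wordOf l [false]] := by
    simp [Wk, allBits]
  have hword1 : wordOf l [false] = qOf l := by simp [wordOf]
  have hmain := loop_eq u l hl (u.length + 2)
      (PySem.Set.add PySem.Set.empty (qOf l)) (qOf l) 1 (le_refl 1)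
      (by rw [hinit, hW1, hword1]; intro w hw; simpa using hw)
      (by rw [hinit, hW1, hword1]; intro w hw _; simpa using hw)
      (by simp [qOf])
  rw [hmain]
  set m := fwLoopB (coveredB ((l : Nat) : Int) (VOf u l)) (u.length + 2) 1
  rw [show ((m * l : Nat) : Int) = ((m * l : Nat) : Int) from rfl]
  rw [PySem.Int.floordiv_natCast]
  rw [Nat.mul_div_cancel m hl]
  rfl

-- ===== VERDICT (by name: the statement is the Claim_ definition above) =====
theorem fw_spec : Claim_equal_fw := by
  intro u _ hpre
  exact fw_eq u hpre
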